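-- pv_equiv track=rewrite | github.com/NobuyukiInoue/LeetCode | Problems/2200_2299/2200_Find_All_K-Distant_Indices_in_an_Array/Project_Python3/Find_All_K-Distant_Indices_in_an_Array.py | findKDistantIndices_normal
-- ===== SOURCE A (Python) =====
-- from typing import List, Dict, Tuple
--
-- def findKDistantIndices_normal(nums: List[int], key: int, k: int) -> List[int]:
--     # 140ms
--     key_index = []
--     for i, _ in enumerate(nums):
--         if nums[i] == key:
--             key_index.append(i)
--     res = []
--     for i, _ in enumerate(nums):
--         for _, pos in enumerate(key_index):
--             if abs(i - pos) <= k: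
--                 res.append(i)
--                 break
--     return res
-- ===== SOURCE B (Python) =====
-- def findKDistantIndices_normal(nums, key, k):
--     # Merge the coverage intervals [p-k, p+k] of the (already sorted) key
--     # positions in one linear sweep; `nxt` is the first index not yet emitted.
--     res = []
--     nxt = 0
--     n = len(nums)
--     for p, v in enumerate(nums):
--         if v == key:
--             start = max(nxt, p - k)
--             end = min(n - 1, p + k)
--             res.extend(range(start, end + 1))
--             nxt = max(nxt, end + 1)
--     return res
-- ===== Notes on version B (the rewrite author's own statement) =====
-- stated objective: faster
-- what changed: Replaced the per-index inner scan over all key positions by a single linear sweep that merges the coverage intervals [p-k, p+k] of the sorted key positions, emitting each covered index once.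
import Mathlib
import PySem

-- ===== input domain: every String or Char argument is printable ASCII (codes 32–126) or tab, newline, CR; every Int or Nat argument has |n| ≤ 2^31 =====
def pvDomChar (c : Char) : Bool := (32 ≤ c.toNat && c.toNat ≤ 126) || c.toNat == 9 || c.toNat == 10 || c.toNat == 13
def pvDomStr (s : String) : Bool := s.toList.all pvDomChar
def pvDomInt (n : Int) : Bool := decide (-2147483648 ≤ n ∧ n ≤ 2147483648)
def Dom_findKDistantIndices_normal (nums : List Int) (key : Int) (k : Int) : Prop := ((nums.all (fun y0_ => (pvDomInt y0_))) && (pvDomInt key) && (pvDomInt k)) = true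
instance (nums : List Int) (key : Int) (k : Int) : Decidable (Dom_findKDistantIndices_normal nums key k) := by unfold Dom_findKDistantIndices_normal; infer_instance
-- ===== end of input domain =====

-- B merges the coverage intervals [p-k,p+k] of the sorted key positions in one
-- linear sweep instead of scanning all key positions for every index (faster).

-- ===== PORT A =====
-- inner 'for pos in key_index: if abs(i-pos) <= k: res.append(i); break'
def pvInnerA (res : List Int) (i k : Int) : List Int → List Int
  | [] => res
  | pos :: rest => if |i - pos| ≤ k then res ++ [i] else pvInnerA res i k rest

def findKDistantIndices_normal (nums : List Int) (key : Int) (k : Int) : List Int :=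
  let keyIndex := (PySem.List.enumerate nums 0).foldl
      (fun acc p => if PySem.List.pyGetD nums p.1 0 = key then acc ++ [p.1] else acc) []
  (PySem.List.enumerate nums 0).foldl (fun res p => pvInnerA res p.1 k keyIndex) []

-- ===== PORT B =====
def findKDistantIndices_normal_alt (nums : List Int) (key : Int) (k : Int) : List Int :=
  let n := PySem.List.len nums
  ((PySem.List.enumerate nums 0).foldl
    (fun (st : List Int × Int) p =>
      if p.2 = key then
        (st.1 ++ PySem.List.pyRange (max st.2 (p.1 - k)) (min (n - 1) (p.1 + k) + 1) 1,
         max st.2 (min (n - 1) (p.1 + k) + 1))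
      else st) ([], 0)).1

-- ===== PRECONDITION & SPEC =====
def Spec_findKDistantIndices_normal (nums : List Int) (key : Int) (k : Int) (out : List Int) : Prop := out = findKDistantIndices_normal_alt nums key k
instance (nums : List Int) (key : Int) (k : Int) (out : List Int) : Decidable (Spec_findKDistantIndices_normal nums key k out) := by unfold Spec_findKDistantIndices_normal; infer_instance

-- ===== CLAIM (what is proved, stated in full; the proofs are below) =====
def Claim_equal_findKDistantIndices_normal : Prop := ∀ (nums : List Int) (key : Int) (k : Int), Dom_findKDistantIndices_normal nums key k → Spec_findKDistantIndices_normal nums key k (findKDistantIndices_normal nums key k)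

-- ===== LEMMAS AND PROOFS =====

-- A's inner loop (append-and-break) is an 'any' test.
theorem pvInnerA_eq (res : List Int) (i k : Int) (l : List Int) :
    pvInnerA res i k l = if l.any (fun pos => decide (|i - pos| ≤ k)) then res ++ [i] else res := by
  induction l with
  | nil => simp [pvInnerA]
  | cons pos rest ih =>
    by_cases h : |i - pos| ≤ k <;> simp [pvInnerA, h, ih]

-- filtering a unit range by an interval predicate yields a subrange
theorem pvFiltRange (a b c d : Int) :
    (PySem.List.pyRange a b 1).filter (fun i => decide (c ≤ i ∧ i ≤ d)) =
      PySem.List.pyRange (max a c) (min b (d + 1)) 1 := by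
  by_cases hab : b ≤ a
  · rw [PySem.List.pyRange_one_eq_nil hab, PySem.List.pyRange_one_eq_nil (by omega)]
    rfl
  · rw [PySem.List.pyRange_one_cons (by omega)]
    have ih := pvFiltRange (a + 1) b c d
    by_cases h : c ≤ a ∧ a ≤ d
    · have h1 : max a c = a := by omega
      have h2 : max (a + 1) c = a + 1 := by omega
      rw [List.filter_cons]
      simp only [h, and_self, decide_true, if_true]
      rw [ih, h2, h1]
      conv_rhs => rw [PySem.List.pyRange_one_cons (lt_min (by omega) (by omega))]
    · rw [List.filter_cons]
      simp only [decide_eq_true_eq, h, if_false]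
      rw [ih]
      by_cases hc : a < c
      · have h3 : max (a + 1) c = max a c := by omega
        rw [h3]
      · -- then d < a, both sides nil
        rw [PySem.List.pyRange_one_eq_nil (by omega), PySem.List.pyRange_one_eq_nil (by omega)]
termination_by (b - a).toNat
decreasing_by omega

-- the merge sweep over a strictly increasing list of key positions emits
-- exactly the covered indices of [nxt, n), in order
theorem pvMerge (n k : Int) (l : List Int) :
    ∀ (nxt : Int) (res : List Int), l.Pairwise (· < ·) → nxt ≤ n →
    (l.foldl (fun (st : List Int × Int) p =>
        (st.1 ++ PySem.List.pyRange (max st.2 (p - k)) (min (n - 1) (p + k) + 1) 1,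
         max st.2 (min (n - 1) (p + k) + 1))) (res, nxt)).1 =
      res ++ (PySem.List.pyRange nxt n 1).filter
        (fun i => l.any (fun pos => decide (|i - pos| ≤ k))) := by
  induction l with
  | nil => intro nxt res _ _; simp
  | cons p rest ih =>
    intro nxt res hpw hn
    have hrest : ∀ q ∈ rest, p < q := by
      intro q hq; exact (List.pairwise_cons.mp hpw).1 q hq
    set start := max nxt (p - k) with hstart
    set e := min (n - 1) (p + k) with he
    set nxt' := max nxt (e + 1) with hnxt'
    have h1 : nxt ≤ nxt' := by omega
    have h2 : nxt' ≤ n := by omega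
    rw [List.foldl_cons, ih nxt' _ (List.pairwise_cons.mp hpw).2 h2, List.append_assoc]
    congr 1
    rw [PySem.List.pyRange_one_append nxt nxt' n h1 h2, List.filter_append]
    congr 1
    · -- part in [nxt, nxt') : exactly the interval [start, e]
      have hcongr : (PySem.List.pyRange nxt nxt' 1).filter
          (fun i => (p :: rest).any (fun pos => decide (|i - pos| ≤ k))) =
          (PySem.List.pyRange nxt nxt' 1).filter (fun i => decide (start ≤ i ∧ i ≤ e)) := by
        apply List.filter_congr
        intro i hi
        rw [PySem.List.mem_pyRange_one] at hi
        rw [Bool.eq_iff_iff]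
        simp only [List.any_cons, Bool.or_eq_true, List.any_eq_true, decide_eq_true_eq]
        constructor
        · rintro (hp | ⟨q, hq, habs⟩)
          · rw [abs_le] at hp; omega
          · have := hrest q hq
            rw [abs_le] at habs; omega
        · intro hin
          left; rw [abs_le]; omega
      rw [hcongr, pvFiltRange]
      have h3 : max nxt start = start := by omega
      have h4 : min nxt' (e + 1) = e + 1 := by omega
      rw [h3, h4]
    · -- part in [nxt', n) : p covers nothing there
      apply List.filter_congr
      intro i hi
      rw [PySem.List.mem_pyRange_one] at hi
      rw [Bool.eq_iff_iff]
      simp only [List.any_cons, Bool.or_eq_true, decide_eq_true_eq]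
      constructor
      · intro h; exact Or.inr h
      · rintro (hp | h)
        · rw [abs_le] at hp; exact absurd hi (by omega)
        · exact h

-- ===== VERDICT (by name: the statement is the Claim_ definition above) =====
theorem findKDistantIndices_normal_spec : Claim_equal_findKDistantIndices_normal := by
  intro nums key k _
  unfold Spec_findKDistantIndices_normal findKDistantIndices_normal findKDistantIndices_normal_alt
  rw [PySem.List.enumerate_eq_map_pyRange nums 0]
  simp only [List.foldl_map, PySem.List.len_eq]
  set n : Int := (nums.length : Int) with hn
  set keyIndex := (PySem.List.pyRange 0 n 1).filter
      (fun j => decide (PySem.List.pyGetD nums j 0 = key)) with hki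
  have hkeyIdx : (PySem.List.pyRange 0 n 1).foldl
      (fun acc j => if PySem.List.pyGetD nums j 0 = key then acc ++ [j] else acc) [] = keyIndex := by
    rw [PySem.List.foldl_append_ite_eq_filter]
    simp [hki]
  rw [hkeyIdx]
  have hAside : (PySem.List.pyRange 0 n 1).foldl
      (fun res j => pvInnerA res j k keyIndex) [] =
      (PySem.List.pyRange 0 n 1).filter
        (fun i => keyIndex.any (fun pos => decide (|i - pos| ≤ k))) := by
    simp only [pvInnerA_eq]
    rw [PySem.List.foldl_append_if_eq_filter]
    simp
  rw [hAside]
  have hBside := PySem.List.foldl_ite_eq_foldl_filter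
    (l := PySem.List.pyRange 0 n 1) (init := (([] : List Int), (0 : Int)))
    (p := fun j => PySem.List.pyGetD nums j 0 = key)
    (f := fun (st : List Int × Int) j =>
      (st.1 ++ PySem.List.pyRange (max st.2 (j - k)) (min (n - 1) (j + k) + 1) 1,
       max st.2 (min (n - 1) (j + k) + 1)))
  rw [hBside]
  have hsorted : keyIndex.Pairwise (· < ·) :=
    List.Pairwise.filter _ (PySem.List.pairwise_lt_pyRange_one 0 n)
  rw [pvMerge n k keyIndex 0 [] hsorted (by positivity)]
  simp
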